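-- pv_equiv track=rewrite | github.com/amasud7/hookemHacks2026 | scripts/ingest_from_json.py | parse_media_urls
-- ===== SOURCE A (Python) =====
-- def parse_media_urls(media_urls: list[str]) -> dict:
--     """Categorize media URLs into video, audio, and thumbnail."""
--     result = {"video_cdn": "", "thumb_cdn": ""}
--     for u in media_urls:
--         path_part = u.split("?")[0]
--         if path_part.endswith((".jpg", ".jpeg", ".png", ".webp")) and not result["thumb_cdn"]:
--             result["thumb_cdn"] = u
--         elif path_part.endswith((".mp4", ".mov", ".webm")) and not result["video_cdn"]:
--             result["video_cdn"] = u
--     return result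
-- ===== SOURCE B (Python) =====
-- def parse_media_urls(media_urls: list[str]) -> dict:
--     """Categorize media URLs into video and thumbnail (first match of each kind)."""
--     thumbs = [u for u in media_urls if u.split("?")[0].endswith((".jpg", ".jpeg", ".png", ".webp"))]
--     videos = [u for u in media_urls if u.split("?")[0].endswith((".mp4", ".mov", ".webm"))]
--     return {
--         "video_cdn": videos[0] if videos else "",
--         "thumb_cdn": thumbs[0] if thumbs else "",
--     }
-- ===== Notes on version B (the rewrite author's own statement) =====
-- stated objective: simpler
-- what changed: Replaces A's interleaved stateful loop over a result dict (guarded elif, first-wins flags) with two independent full-list filters per category, taking the head of each; correctness rests on the image/video extension sets being disjoint.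
import Mathlib
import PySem

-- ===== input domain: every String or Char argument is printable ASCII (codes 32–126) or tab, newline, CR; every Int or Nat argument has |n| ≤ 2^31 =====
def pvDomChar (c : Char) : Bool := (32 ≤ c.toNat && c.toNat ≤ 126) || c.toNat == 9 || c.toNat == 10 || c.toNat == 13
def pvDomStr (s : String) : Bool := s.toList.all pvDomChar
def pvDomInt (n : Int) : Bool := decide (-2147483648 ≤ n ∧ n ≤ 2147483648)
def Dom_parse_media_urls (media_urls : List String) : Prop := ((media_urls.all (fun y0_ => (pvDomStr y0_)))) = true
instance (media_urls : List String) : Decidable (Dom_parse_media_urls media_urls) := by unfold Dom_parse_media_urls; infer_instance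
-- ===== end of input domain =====

-- B replaces A's single stateful loop (result dict, first-wins guards, elif) with two independent
-- filters per media category, taking the head of each; objective: simpler decomposition, same cost.

-- ===== PORT A =====
-- loop body of A's for-loop, as a named function for the fold
def pmLoopBody (result : PySem.Dict String String) (u : String) : PySem.Dict String String :=
  let path_part := PySem.List.pyGetD ((PySem.Str.split? u "?").getD []) 0 ""
  if (PySem.Str.endswith path_part ".jpg" || PySem.Str.endswith path_part ".jpeg" ||
      PySem.Str.endswith path_part ".png" || PySem.Str.endswith path_part ".webp")
     && (PySem.Dict.getD result "thumb_cdn" "" == "") then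
    PySem.Dict.insert result "thumb_cdn" u
  else if (PySem.Str.endswith path_part ".mp4" || PySem.Str.endswith path_part ".mov" ||
      PySem.Str.endswith path_part ".webm")
     && (PySem.Dict.getD result "video_cdn" "" == "") then
    PySem.Dict.insert result "video_cdn" u
  else
    result

def parse_media_urls (media_urls : List String) : List (String × String) :=
  let result : PySem.Dict String String := PySem.Dict.ofList [("video_cdn", ""), ("thumb_cdn", "")]
  (media_urls.foldl pmLoopBody result).items

-- ===== PORT B =====
def pvAltPath (u : String) : String :=
  PySem.List.pyGetD ((PySem.Str.split? u "?").getD []) 0 ""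

def pvAltIsThumb (u : String) : Bool :=
  PySem.Str.endswith (pvAltPath u) ".jpg" || PySem.Str.endswith (pvAltPath u) ".jpeg" ||
  PySem.Str.endswith (pvAltPath u) ".png" || PySem.Str.endswith (pvAltPath u) ".webp"

def pvAltIsVideo (u : String) : Bool :=
  PySem.Str.endswith (pvAltPath u) ".mp4" || PySem.Str.endswith (pvAltPath u) ".mov" ||
  PySem.Str.endswith (pvAltPath u) ".webm"

def parse_media_urls_alt (media_urls : List String) : List (String × String) :=
  let thumbs := media_urls.filter pvAltIsThumb
  let videos := media_urls.filter pvAltIsVideo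
  [("video_cdn", videos.headD ""), ("thumb_cdn", thumbs.headD "")]

-- ===== PRECONDITION & SPEC =====
def Spec_parse_media_urls (media_urls : List String) (out : List (String × String)) : Prop := out = parse_media_urls_alt media_urls
instance (media_urls : List String) (out : List (String × String)) : Decidable (Spec_parse_media_urls media_urls out) := by unfold Spec_parse_media_urls; infer_instance

-- ===== CLAIM (what is proved, stated in full; the proofs are below) =====
def Claim_equal_parse_media_urls : Prop := ∀ (media_urls : List String), Dom_parse_media_urls media_urls → Spec_parse_media_urls media_urls (parse_media_urls media_urls)

-- ===== LEMMAS AND PROOFS =====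

-- a nonempty suffix ending in `a` forces the whole string to end in `a`
theorem pvLast_of_suffix {l s : List Char} {a : Char} (h : (l ++ [a]) <:+ s) :
    s.getLast? = some a := by
  obtain ⟨t, rfl⟩ := h
  simp

-- a URL matched as a thumbnail is never matched as a video (extension sets are disjoint)
theorem pvDisjoint (u : String) (h : pvAltIsThumb u = true) : pvAltIsVideo u = false := by
  unfold pvAltIsThumb at h
  simp only [Bool.or_eq_true, PySem.Str.endswith_eq, PySem.Chars.endswith_iff] at h
  have hlast : (pvAltPath u).toList.getLast? = some 'g' ∨ (pvAltPath u).toList.getLast? = some 'p' := by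
    rcases h with ((h | h) | h) | h
    · exact Or.inl (pvLast_of_suffix (l := ['.', 'j', 'p']) (a := 'g') h)
    · exact Or.inl (pvLast_of_suffix (l := ['.', 'j', 'p', 'e']) (a := 'g') h)
    · exact Or.inl (pvLast_of_suffix (l := ['.', 'p', 'n']) (a := 'g') h)
    · exact Or.inr (pvLast_of_suffix (l := ['.', 'w', 'e', 'b']) (a := 'p') h)
  by_contra hcon
  simp only [Bool.not_eq_false] at hcon
  unfold pvAltIsVideo at hcon
  simp only [Bool.or_eq_true, PySem.Str.endswith_eq, PySem.Chars.endswith_iff] at hcon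
  rcases hcon with (hc | hc) | hc
  · have := pvLast_of_suffix (l := ['.', 'm', 'p']) (a := '4') hc
    rcases hlast with hl | hl <;> simp_all
  · have := pvLast_of_suffix (l := ['.', 'm', 'o']) (a := 'v') hc
    rcases hlast with hl | hl <;> simp_all
  · have := pvLast_of_suffix (l := ['.', 'w', 'e', 'b']) (a := 'm') hc
    rcases hlast with hl | hl <;> simp_all

theorem pvThumb_ne_empty {u : String} (h : pvAltIsThumb u = true) : u ≠ "" := by
  rintro rfl; revert h; decide

theorem pvVideo_ne_empty {u : String} (h : pvAltIsVideo u = true) : u ≠ "" := by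
  rintro rfl; revert h; decide

-- one loop step of A, expressed through B's predicates on a two-key state
theorem pvStep (v t u : String) :
    pmLoopBody (PySem.Dict.mk [("video_cdn", v), ("thumb_cdn", t)]) u =
      if pvAltIsThumb u && (t == "") then PySem.Dict.mk [("video_cdn", v), ("thumb_cdn", u)]
      else if pvAltIsVideo u && (v == "") then PySem.Dict.mk [("video_cdn", u), ("thumb_cdn", t)]
      else PySem.Dict.mk [("video_cdn", v), ("thumb_cdn", t)] := by
  unfold pmLoopBody pvAltIsThumb pvAltIsVideo pvAltPath
  simp only [PySem.Dict.getD, PySem.Dict.get?, PySem.Dict.insert]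
  split_ifs <;> simp_all

-- the loop invariant: each field is its initial value if nonempty, else the first URL of its category
theorem pvLoop (xs : List String) (v t : String) :
    (xs.foldl pmLoopBody (PySem.Dict.mk [("video_cdn", v), ("thumb_cdn", t)])).items
      = [("video_cdn", if v = "" then ((xs.filter pvAltIsVideo).headD "") else v),
         ("thumb_cdn", if t = "" then ((xs.filter pvAltIsThumb).headD "") else t)] := by
  induction xs generalizing v t with
  | nil => simp
  | cons u rest ih =>
    rw [List.foldl_cons, pvStep, List.filter_cons, List.filter_cons]
    by_cases hT : pvAltIsThumb u
    · have hV : pvAltIsVideo u = false := pvDisjoint u hT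
      by_cases ht : t = ""
      · subst ht
        simp [hT, hV, ih, if_neg (pvThumb_ne_empty hT)]
      · simp [hT, hV, ht, ih]
    · simp only [Bool.not_eq_true] at hT
      by_cases hV : pvAltIsVideo u
      · by_cases hv : v = ""
        · subst hv
          simp [hT, hV, ih, if_neg (pvVideo_ne_empty hV)]
        · simp [hT, hV, hv, ih]
      · simp only [Bool.not_eq_true] at hV
        simp [hT, hV, ih]

-- ===== VERDICT (by name: the statement is the Claim_ definition above) =====
theorem parse_media_urls_spec : Claim_equal_parse_media_urls := by
  intro media_urls _
  unfold Spec_parse_media_urls parse_media_urls parse_media_urls_alt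
  have hinit : PySem.Dict.ofList [("video_cdn", ""), ("thumb_cdn", "")]
      = PySem.Dict.mk [("video_cdn", ""), ("thumb_cdn", "")] := by decide
  rw [hinit, pvLoop]
  simp
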